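-- pv_equiv track=rewrite | github.com/OhhMoo/SPEQTRO | src/speqtro/input/mestrexport.py | _is_mestranova
-- ===== SOURCE A (Python) =====
-- def _is_mestranova(text: str) -> bool:
--     """Check for MestReNova fingerprints in the file."""
--     markers = [
--         "mestrelab", "mnova", "mestrenova",
--         "multiplet list", "peak list",
--         "δ (ppm)", "d (ppm)", "chemical shift",
--     ]
--     lower = text.lower()
--     return any(m in lower for m in markers)
-- ===== SOURCE B (Python) =====
-- def _is_mestranova(text: str) -> bool:
--     """Check for MestReNova fingerprints in the file."""
--     markers = [
--         "mestrelab", "mnova", "mestrenova",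
--         "multiplet list", "peak list",
--         "δ (ppm)", "d (ppm)", "chemical shift",
--     ]
--     for i in range(len(text)):
--         for m in markers:
--             if text[i:i + len(m)].lower() == m:
--                 return True
--     return False
-- ===== Notes on version B (the rewrite author's own statement) =====
-- stated objective: alternative
-- what changed: Instead of lowercasing the whole text and running one independent substring scan per marker, B makes a single pass over the text positions and compares the lowered fixed-length window at each position against each marker.
import Mathlib
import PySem

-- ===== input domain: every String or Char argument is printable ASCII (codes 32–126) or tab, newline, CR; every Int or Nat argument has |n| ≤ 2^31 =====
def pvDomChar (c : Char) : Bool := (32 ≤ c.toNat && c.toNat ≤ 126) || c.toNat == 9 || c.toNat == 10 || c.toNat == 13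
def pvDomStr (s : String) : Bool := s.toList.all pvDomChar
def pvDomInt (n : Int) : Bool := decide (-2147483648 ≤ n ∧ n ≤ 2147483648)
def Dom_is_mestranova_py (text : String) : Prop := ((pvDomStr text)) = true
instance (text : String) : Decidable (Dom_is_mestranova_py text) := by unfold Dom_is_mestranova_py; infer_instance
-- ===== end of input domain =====

-- B replaces "lower the whole text, then run one independent substring scan per marker"
-- by a single left-to-right pass over the text positions, comparing the lowered slice at
-- each position against each marker (objective: alternative decomposition, same cost class).


-- ===== PORT A =====
-- A's marker list
def mestranovaMarkers : List String :=
  ["mestrelab", "mnova", "mestrenova",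
   "multiplet list", "peak list",
   "δ (ppm)", "d (ppm)", "chemical shift"]

-- lower = text.lower(); any(m in lower for m in markers)
def is_mestranova_py (text : String) : Bool :=
  let lower := PySem.Str.lower text
  mestranovaMarkers.any (fun m => PySem.Str.isIn m lower)

-- ===== PORT B =====
-- B's Python defines the identical marker list; the port cites the same constant.
-- for i in range(len(text)): for m in markers: if text[i:i+len(m)].lower() == m: return True
-- (the early 'return True' of the pure double loop is List.any of List.any)
def is_mestranova_py_alt (text : String) : Bool :=
  (PySem.List.pyRange 0 (PySem.Str.len text) 1).any (fun i =>
    mestranovaMarkers.any (fun m =>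
      PySem.Str.lower (PySem.Str.slice text (some i) (some (i + PySem.Str.len m))) == m))

-- ===== PRECONDITION & SPEC =====
def Spec_is_mestranova_py (text : String) (out : Bool) : Prop := out = is_mestranova_py_alt text
instance (text : String) (out : Bool) : Decidable (Spec_is_mestranova_py text out) := by unfold Spec_is_mestranova_py; infer_instance

-- ===== CLAIM (what is proved, stated in full; the proofs are below) =====
def Claim_equal_is_mestranova_py : Prop := ∀ (text : String), Dom_is_mestranova_py text → Spec_is_mestranova_py text (is_mestranova_py text)

-- ===== LEMMAS AND PROOFS =====

-- a nonempty pattern is an infix of `l.map f` iff at some position j of l the lowered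
-- (mapped) window of the pattern's length equals the pattern
theorem infix_map_iff_window (f : Char → Char) (m l : List Char) (hm : m ≠ []) :
    m <:+: l.map f ↔ ∃ j, j < l.length ∧ ((l.drop j).take m.length).map f = m := by
  constructor
  · rintro ⟨p, s, h⟩
    refine ⟨p.length, ?_, ?_⟩
    · have := congrArg List.length h
      simp at this
      have hml : 0 < m.length := List.length_pos_iff.mpr hm
      omega
    · have : ((l.map f).drop p.length).take m.length = m := by
        rw [← h]; simp
      rw [List.map_take, List.map_drop]; exact this
  · rintro ⟨j, hj, h⟩
    have : ((l.map f).drop j).take m.length = m := by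
      rw [← List.map_drop, ← List.map_take]; exact h
    rw [← this]
    exact ((List.take_prefix _ _).isInfix).trans ((List.drop_suffix _ _).isInfix)

theorem markers_ne_nil : ∀ m ∈ mestranovaMarkers, m.toList ≠ [] := by decide

-- ===== VERDICT (by name: the statement is the Claim_ definition above) =====
theorem is_mestranova_py_spec : Claim_equal_is_mestranova_py := by
  intro text _
  unfold Spec_is_mestranova_py is_mestranova_py is_mestranova_py_alt
  rw [Bool.eq_iff_iff]
  simp only [List.any_eq_true, PySem.Str.isIn_iff_infix, PySem.List.mem_pyRange_one]
  constructor
  · rintro ⟨m, hmem, hinf⟩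
    have hlow : (PySem.Str.lower text).toList = text.toList.map PySem.Chars.lowerChar := by rw [PySem.Str.toList_lower]; rfl
    rw [hlow, infix_map_iff_window _ _ _ (markers_ne_nil m hmem)] at hinf
    obtain ⟨j, hj, hwin⟩ := hinf
    refine ⟨(j : Int), ⟨by positivity, ?_⟩, m, hmem, ?_⟩
    · simp [pysem]; exact_mod_cast hj
    · rw [beq_iff_eq, String.ext_iff]
      have hs : (PySem.Str.slice text (some (j : Int)) (some ((j : Int) + PySem.Str.len m))).toList
          = (text.toList.drop j).take m.toList.length := by
        simp [pysem, PySem.List.slice_natCast_add]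
      have : (PySem.Str.lower (PySem.Str.slice text (some (j : Int)) (some ((j : Int) + PySem.Str.len m)))).toList
          = ((text.toList.drop j).take m.toList.length).map PySem.Chars.lowerChar := by
        rw [PySem.Str.toList_lower, hs]; rfl
      rw [this]; exact hwin
  · rintro ⟨i, ⟨hi0, hin⟩, m, hmem, heq⟩
    refine ⟨m, hmem, ?_⟩
    have hlow : (PySem.Str.lower text).toList = text.toList.map PySem.Chars.lowerChar := by rw [PySem.Str.toList_lower]; rfl
    rw [hlow, infix_map_iff_window _ _ _ (markers_ne_nil m hmem)]
    obtain ⟨j, rfl⟩ := Int.eq_ofNat_of_zero_le hi0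
    refine ⟨j, ?_, ?_⟩
    · simp [pysem] at hin; exact_mod_cast hin
    · rw [beq_iff_eq, String.ext_iff] at heq
      have hs : (PySem.Str.slice text (some (j : Int)) (some ((j : Int) + PySem.Str.len m))).toList
          = (text.toList.drop j).take m.toList.length := by
        simp [pysem, PySem.List.slice_natCast_add]
      have h2 : (PySem.Str.lower (PySem.Str.slice text (some (j : Int)) (some ((j : Int) + PySem.Str.len m)))).toList
          = ((text.toList.drop j).take m.toList.length).map PySem.Chars.lowerChar := by
        rw [PySem.Str.toList_lower, hs]; rfl
      rw [h2] at heq; exact heq
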